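-- pv_equiv track=rewrite | github.com/firedial/til | python/mahjong/form.py | handGravityPosition
-- ===== SOURCE A (Python) =====
-- def handGravityPosition(hand: list[int]) -> int:
--     """
--     牌形の重心を求める
--
--     両端に接地している連続する 0 を無視する。
--     両端から見て行った時、大きい数字がある方に重心がある。
--     同じ場合はさらに一つ内側で比較する。最後まで一緒なら左右対称形。
--
--     例:
--         [0, 2, 4, 0, 0] -> 後方重心
--         [0, 2, 2, 3, 2] -> 後方重心
--         [0, 2, 2, 1, 2] -> 前方重心
--         [0, 2, 1, 1, 2, 0, 0] -> 左右対称形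
--
--     Args:
--         hand (list[int]): 牌形
--
--     Returns:
--         int: 前方重心 1 / 左右対称 0 / 後方重心 -1
--
--     """
--     handLength: int = len(hand)
--
--     first: int = 0
--     last: int = handLength - 1
--
--     # 前から見たときに初めて 0 でない場所を見つける
--     while first < handLength:
--         if hand[first] != 0:
--             break
--         first += 1
--
--     # 後ろから見たときに初めて 0 でない場所を見つける
--     while 0 <= last:
--         if hand[last] != 0:
--             break
--         last -= 1
--
--     # 両端から重心を見ていく
--     while first < last:
--         if hand[first] > hand[last]:
--             # 前方重心
--             return 1
--         if hand[first] < hand[last]: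
--             # 後方重心
--             return -1
--         first += 1
--         last -= 1
--
--     # 左右対称形
--     return 0
-- ===== SOURCE B (Python) =====
-- def handGravityPosition(hand: list[int]) -> int:
--     nz = [i for i, x in enumerate(hand) if x != 0]
--     if not nz:
--         return 0
--     t = hand[nz[0]:nz[-1] + 1]
--     return (t > t[::-1]) - (t < t[::-1])
-- ===== Notes on version B (the rewrite author's own statement) =====
-- stated objective: simpler
-- what changed: A's three hand-written index while-loops (scan for first nonzero, scan for last nonzero, two-pointer outside-in comparison) are replaced by one comprehension collecting the nonzero indices, a slice, and Python's built-in lexicographic list comparison of the trimmed sublist against its reverse.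
import Mathlib
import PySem

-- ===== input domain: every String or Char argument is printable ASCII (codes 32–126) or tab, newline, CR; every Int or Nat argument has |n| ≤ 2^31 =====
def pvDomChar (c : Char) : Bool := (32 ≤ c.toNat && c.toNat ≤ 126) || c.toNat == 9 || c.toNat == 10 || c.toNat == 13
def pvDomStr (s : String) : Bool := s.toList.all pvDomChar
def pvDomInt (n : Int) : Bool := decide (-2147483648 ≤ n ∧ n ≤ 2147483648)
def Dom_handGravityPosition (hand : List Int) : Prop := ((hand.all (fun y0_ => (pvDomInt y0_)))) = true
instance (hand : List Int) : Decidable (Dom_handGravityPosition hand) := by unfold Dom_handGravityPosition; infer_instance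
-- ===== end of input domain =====

-- B replaces A's three index while-loops by: collect the nonzero indices in one comprehension,
-- slice out the trimmed sublist t and compare t lexicographically with its reverse (objective: simpler).

-- ===== PORT A =====
-- while first < handLength: if hand[first] != 0: break; first += 1
def aFindFirst (hand : List Int) (first : Int) : Int :=
  if h : first < (hand.length : Int) then
    if PySem.List.pyGetD hand first 0 ≠ 0 then first
    else aFindFirst hand (first + 1)
  else first
termination_by ((hand.length : Int) - first).toNat
decreasing_by omega

-- while 0 <= last: if hand[last] != 0: break; last -= 1
def aFindLast (hand : List Int) (last : Int) : Int :=
  if h : 0 ≤ last then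
    if PySem.List.pyGetD hand last 0 ≠ 0 then last
    else aFindLast hand (last - 1)
  else last
termination_by (last + 1).toNat
decreasing_by omega

-- while first < last: compare hand[first] / hand[last], move both inward
def aLoop (hand : List Int) (first last : Int) : Int :=
  if h : first < last then
    if PySem.List.pyGetD hand first 0 > PySem.List.pyGetD hand last 0 then 1
    else if PySem.List.pyGetD hand first 0 < PySem.List.pyGetD hand last 0 then -1
    else aLoop hand (first + 1) (last - 1)
  else 0
termination_by (last - first).toNat
decreasing_by omega

def handGravityPosition (hand : List Int) : Int :=
  aLoop hand (aFindFirst hand 0) (aFindLast hand ((hand.length : Int) - 1))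

-- ===== PORT B =====
-- Python's `<` on two int lists (lexicographic; exact for the lists B compares)
def pyListLt : List Int → List Int → Bool
  | [], [] => false
  | [], _ :: _ => true
  | _ :: _, [] => false
  | a :: as, b :: bs => if a < b then true else if b < a then false else pyListLt as bs

-- nz = [i for i, x in enumerate(hand) if x != 0]
def nzIdx (xs : List Int) (s : Int) : List Int :=
  ((PySem.List.enumerate xs s).filter (fun p => p.2 != 0)).map (·.1)

def handGravityPosition_alt (hand : List Int) : Int :=
  match nzIdx hand 0 with
  | [] => 0
  | f :: rest =>
    let t := PySem.List.slice hand (some f) (some ((f :: rest).getLast (List.cons_ne_nil f rest) + 1))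
    (if pyListLt t.reverse t then 1 else 0) - (if pyListLt t t.reverse then 1 else 0)

-- ===== PRECONDITION & SPEC =====
def Spec_handGravityPosition (hand : List Int) (out : Int) : Prop := out = handGravityPosition_alt hand
instance (hand : List Int) (out : Int) : Decidable (Spec_handGravityPosition hand out) := by unfold Spec_handGravityPosition; infer_instance

-- ===== CLAIM (what is proved, stated in full; the proofs are below) =====
def Claim_equal_handGravityPosition : Prop := ∀ (hand : List Int), Dom_handGravityPosition hand → Spec_handGravityPosition hand (handGravityPosition hand)

-- ===== LEMMAS AND PROOFS =====

-- three-way lexicographic comparison (proof-side common ground of both programs)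
def cmp3 : List Int → List Int → Int
  | a :: as, b :: bs => if a < b then -1 else if b < a then 1 else cmp3 as bs
  | _, _ => 0

-- B's (t > r) - (t < r) is cmp3 t r for equal-length lists
theorem pyListLt_cmp3 (u v : List Int) (h : u.length = v.length) :
    ((if pyListLt v u then (1:Int) else 0) - (if pyListLt u v then 1 else 0)) = cmp3 u v := by
  induction u generalizing v with
  | nil => cases v with
    | nil => simp [pyListLt, cmp3]
    | cons b bs => simp at h
  | cons a as ih =>
    cases v with
    | nil => simp at h
    | cons b bs =>
      simp only [List.length_cons, Nat.add_right_cancel_iff] at h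
      by_cases h1 : a < b
      · simp [pyListLt, cmp3, h1, not_lt_of_gt h1]
      · by_cases h2 : b < a
        · simp [pyListLt, cmp3, h1, h2]
        · simp only [pyListLt, cmp3, if_neg h1, if_neg h2]
          exact ih bs h

theorem cmp3_append (u v x y : List Int) (h : u.length = v.length) :
    cmp3 (u ++ x) (v ++ y) = if cmp3 u v = 0 then cmp3 x y else cmp3 u v := by
  induction u generalizing v with
  | nil => cases v with
    | nil => simp [cmp3]
    | cons b bs => simp at h
  | cons a as ih =>
    cases v with
    | nil => simp at h
    | cons b bs =>
      simp only [List.length_cons, Nat.add_right_cancel_iff] at h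
      simp only [List.cons_append, cmp3]
      split_ifs with h1 h2 <;> simp_all [ih bs h]

theorem cmp3_cons (a b : Int) (as bs : List Int) :
    cmp3 (a :: as) (b :: bs) = if a < b then -1 else if b < a then 1 else cmp3 as bs := by
  simp [cmp3]

def cmir (t : List Int) : Int := cmp3 t t.reverse

theorem cmir_singleton (a : Int) : cmir [a] = 0 := by simp [cmir, cmp3]

theorem cmir_wrap (a b : Int) (m : List Int) :
    cmir (a :: m ++ [b]) = if b < a then 1 else if a < b then -1 else cmir m := by
  unfold cmir
  have hrev : (a :: m ++ [b]).reverse = b :: m.reverse ++ [a] := by simp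
  rw [hrev]
  simp only [List.cons_append]
  rw [cmp3_cons]
  rcases lt_trichotomy a b with h | h | h
  · simp [h, not_lt_of_gt h]
  · subst h
    simp only [lt_irrefl, if_false]
    rw [cmp3_append m m.reverse [a] [a] (by simp)]
    by_cases h0 : cmp3 m m.reverse = 0
    · simp [h0, cmp3]
    · simp [h0]
  · simp [h, not_lt_of_gt h]

-- ---- A-side characterization ----

theorem aFindFirst_spec (xs : List Int) (k : Nat) (hk : k ≤ xs.length) :
    aFindFirst xs (k : Int) = ((k + ((xs.drop k).takeWhile (fun x => x == 0)).length : Nat) : Int) := by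
  rw [aFindFirst]
  by_cases hlt : (k : Int) < xs.length
  · have hk' : k < xs.length := by exact_mod_cast hlt
    rw [dif_pos hlt]
    have hget : PySem.List.pyGetD xs (k : Int) 0 = xs[k] := by
      rw [PySem.List.pyGetD_eq_getElem xs 0 (by exact_mod_cast Nat.zero_le k) hlt]
      simp
    rw [List.drop_eq_getElem_cons hk']
    by_cases hz : xs[k] = 0
    · rw [if_neg (by simp [hget, hz])]
      rw [show (k : Int) + 1 = ((k + 1 : Nat) : Int) by push_cast; ring,
          aFindFirst_spec xs (k + 1) hk']
      rw [List.takeWhile_cons, if_pos (by simp [hz])]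
      simp only [List.length_cons]
      push_cast
      omega
    · rw [if_pos (by simp [hget, hz])]
      rw [List.takeWhile_cons, if_neg (by simp [hz])]
      simp
  · rw [dif_neg hlt]
    have : xs.drop k = [] := List.drop_eq_nil_of_le (by omega)
    simp [this]
termination_by xs.length - k

theorem aFindLast_spec (xs : List Int) (k : Nat) (hk : k ≤ xs.length) :
    aFindLast xs ((k : Int) - 1) = (k : Int) - 1 - ((xs.take k).reverse.takeWhile (fun x => x == 0)).length := by
  induction k with
  | zero =>
    rw [aFindLast, dif_neg (by omega)]
    simp
  | succ k ih =>
    have hk' : k < xs.length := by omega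
    have htake : xs.take (k + 1) = xs.take k ++ [xs[k]] := by
      rw [List.take_add_one]
      simp [List.getElem?_eq_getElem hk']
    have hrevtake : (xs.take (k + 1)).reverse = xs[k] :: (xs.take k).reverse := by
      rw [htake]; simp
    rw [show ((k + 1 : Nat) : Int) - 1 = (k : Int) by push_cast; ring]
    rw [aFindLast, dif_pos (by exact_mod_cast Nat.zero_le k)]
    have hget : PySem.List.pyGetD xs (k : Int) 0 = xs[k] := by
      rw [PySem.List.pyGetD_eq_getElem xs 0 (by exact_mod_cast Nat.zero_le k) (by exact_mod_cast hk')]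
      simp
    rw [hrevtake]
    by_cases hz : xs[k] = 0
    · rw [if_neg (by simp [hget, hz])]
      rw [ih (by omega)]
      rw [List.takeWhile_cons, if_pos (by simp [hz])]
      simp only [List.length_cons]
      push_cast
      omega
    · rw [if_pos (by simp [hget, hz])]
      rw [List.takeWhile_cons, if_neg (by simp [hz])]
      simp

theorem cmir_short (t : List Int) (h : t.length ≤ 1) : cmir t = 0 := by
  match t, h with
  | [], _ => rfl
  | [a], _ => exact cmir_singleton a
  | a :: b :: t, h => simp at h

theorem aLoop_spec (xs : List Int) (f l : Nat) (hl : l < xs.length) :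
    aLoop xs (f : Int) (l : Int) = cmir ((xs.take (l + 1)).drop f) := by
  rw [aLoop]
  by_cases hfl : (f : Int) < l
  · have hf' : f < l := by exact_mod_cast hfl
    have hfx : f < xs.length := by omega
    have hget_f : PySem.List.pyGetD xs (f : Int) 0 = xs[f] := by
      rw [PySem.List.pyGetD_eq_getElem xs 0 (by exact_mod_cast Nat.zero_le f) (by exact_mod_cast hfx)]
      simp
    have hget_l : PySem.List.pyGetD xs (l : Int) 0 = xs[l] := by
      rw [PySem.List.pyGetD_eq_getElem xs 0 (by exact_mod_cast Nat.zero_le l) (by exact_mod_cast hl)]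
      simp
    have hlen_take : (xs.take l).length = l := by simp; omega
    have hsplit : (xs.take (l + 1)).drop f = xs[f] :: ((xs.take l).drop (f + 1)) ++ [xs[l]] := by
      rw [List.take_add_one, List.getElem?_eq_getElem hl]
      simp only [Option.toList_some]
      rw [List.drop_append_of_le_length (by omega)]
      rw [List.drop_eq_getElem_cons (by omega : f < (xs.take l).length)]
      rw [List.getElem_take]
    rw [dif_pos hfl, hsplit, cmir_wrap]
    rw [hget_f, hget_l]
    by_cases h1 : xs[l] < xs[f]
    · rw [if_pos (by exact h1), if_pos h1]
    · rw [if_neg (by exact h1), if_neg h1]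
      by_cases h2 : xs[f] < xs[l]
      · rw [if_pos h2, if_pos h2]
      · rw [if_neg h2, if_neg h2]
        have h1' : 1 ≤ l := by omega
        have hrec := aLoop_spec xs (f + 1) (l - 1) (by omega)
        rw [show (f : Int) + 1 = ((f + 1 : Nat) : Int) by push_cast; ring,
            show (l : Int) - 1 = ((l - 1 : Nat) : Int) by omega]
        rw [hrec, Nat.sub_add_cancel h1']
  · rw [dif_neg hfl]
    have hfl' : l ≤ f := by exact_mod_cast not_lt.mp hfl
    refine (cmir_short _ ?_).symm
    simp only [List.length_drop, List.length_take]
    omega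
termination_by l - f

-- ---- B-side characterization ----

theorem nzIdx_nil (s : Int) : nzIdx [] s = [] := by
  simp [nzIdx, PySem.List.enumerate_nil]

theorem nzIdx_cons (x : Int) (xs : List Int) (s : Int) :
    nzIdx (x :: xs) s = if x = 0 then nzIdx xs (s + 1) else s :: nzIdx xs (s + 1) := by
  by_cases h : x = 0 <;> simp [nzIdx, PySem.List.enumerate_cons, h]

theorem nzIdx_nil_iff (xs : List Int) (s : Int) :
    nzIdx xs s = [] ↔ ∀ x ∈ xs, x = 0 := by
  induction xs generalizing s with
  | nil => simp [nzIdx_nil]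
  | cons x xs ih =>
    rw [nzIdx_cons]
    by_cases h : x = 0 <;> simp [h, ih]

theorem nzIdx_head (xs : List Int) (s : Int) (h : nzIdx xs s ≠ []) :
    (nzIdx xs s).head? = some (s + (xs.takeWhile (fun x => x == 0)).length) := by
  induction xs generalizing s with
  | nil => simp [nzIdx_nil] at h
  | cons x xs ih =>
    rw [nzIdx_cons] at h ⊢
    by_cases hx : x = 0
    · rw [if_pos hx] at h ⊢
      rw [ih (s + 1) h, List.takeWhile_cons, if_pos (by simp [hx])]
      simp only [List.length_cons]
      push_cast
      ring_nf
    · rw [if_neg hx]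
      rw [List.takeWhile_cons, if_neg (by simp [hx])]
      simp

-- if some element of xs is nonzero, its zero-takeWhile is strictly shorter than xs
theorem takeWhile_zero_lt (xs : List Int) (h : ¬ ∀ x ∈ xs, x = 0) :
    (xs.takeWhile (fun x => x == 0)).length < xs.length := by
  by_cases heq : xs.takeWhile (fun x => x == 0) = xs
  · exact absurd (fun x hx => by simpa using List.takeWhile_eq_self_iff.mp heq x hx) h
  · exact lt_of_le_of_ne (List.takeWhile_sublist _).length_le
      (fun hlen => heq ((List.takeWhile_sublist _).eq_of_length hlen))

theorem nzIdx_last (xs : List Int) (s : Int) (h : nzIdx xs s ≠ []) :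
    (nzIdx xs s).getLast? = some (s + xs.length - 1 - (xs.reverse.takeWhile (fun x => x == 0)).length) := by
  induction xs generalizing s with
  | nil => simp [nzIdx_nil] at h
  | cons x xs ih =>
    by_cases hnz : nzIdx xs (s + 1) = []
    · have hall : ∀ y ∈ xs, y = 0 := (nzIdx_nil_iff xs (s + 1)).mp hnz
      have hx : x ≠ 0 := by
        intro hx0
        rw [nzIdx_cons, if_pos hx0] at h
        exact h hnz
      rw [nzIdx_cons, if_neg hx, hnz]
      have hrev : (x :: xs).reverse = xs.reverse ++ [x] := by simp
      rw [hrev, List.takeWhile_append]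
      have hself : xs.reverse.takeWhile (fun y => y == 0) = xs.reverse :=
        List.takeWhile_eq_self_iff.mpr (fun y hy => by
          simp [hall y (List.mem_reverse.mp hy)])
      rw [hself, if_pos rfl, List.takeWhile_cons, if_neg (by simp [hx])]
      simp only [List.append_nil, List.getLast?_cons, List.getLast?_nil, List.length_reverse,
        List.length_cons, Option.getD_none]
      push_cast
      ring_nf
    · have hex : ¬ ∀ y ∈ xs, y = 0 := fun hall => hnz ((nzIdx_nil_iff xs (s + 1)).mpr hall)
      have hlt : (xs.reverse.takeWhile (fun y => y == 0)).length < xs.length := by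
        have := takeWhile_zero_lt xs.reverse (by
          intro hall; exact hex (fun y hy => hall y (List.mem_reverse.mpr hy)))
        simpa using this
      have hrev : (x :: xs).reverse = xs.reverse ++ [x] := by simp
      have htw : ((x :: xs).reverse.takeWhile (fun y => y == 0)) = xs.reverse.takeWhile (fun y => y == 0) := by
        rw [hrev, List.takeWhile_append, if_neg (by simp; omega)]
      have hih := ih (s + 1) hnz
      rw [htw]
      rw [nzIdx_cons]
      by_cases hx : x = 0
      · rw [if_pos hx, hih]
        simp only [List.length_cons]
        push_cast
        ring_nf
      · rw [if_neg hx, List.getLast?_cons, hih]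
        simp only [Option.getD_some]
        simp only [List.length_cons]
        push_cast
        ring_nf

-- ===== VERDICT (by name: the statement is the Claim_ definition above) =====
theorem handGravityPosition_spec : Claim_equal_handGravityPosition := by
  intro hand _
  show handGravityPosition hand = handGravityPosition_alt hand
  have h1 : aFindFirst hand 0 = ((hand.takeWhile (fun x => x == 0)).length : Int) := by
    have := aFindFirst_spec hand 0 (Nat.zero_le _)
    simpa using this
  have h2 : aFindLast hand ((hand.length : Int) - 1) =
      (hand.length : Int) - 1 - (hand.reverse.takeWhile (fun x => x == 0)).length := by
    have := aFindLast_spec hand hand.length le_rfl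
    simpa using this
  rw [handGravityPosition, h1, h2]
  by_cases hz : ∀ x ∈ hand, x = 0
  · -- all tiles zero: both sides are 0
    have hnz : nzIdx hand 0 = [] := (nzIdx_nil_iff hand 0).mpr hz
    have htw : hand.takeWhile (fun x => x == 0) = hand :=
      List.takeWhile_eq_self_iff.mpr (fun x hx => by simp [hz x hx])
    have hrtw : hand.reverse.takeWhile (fun x => x == 0) = hand.reverse :=
      List.takeWhile_eq_self_iff.mpr (fun x hx => by simp [hz x (List.mem_reverse.mp hx)])
    rw [htw, hrtw, handGravityPosition_alt, hnz]
    rw [aLoop, dif_neg (by simp only [List.length_reverse]; omega)]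
  · -- there is a nonzero tile
    have hne : nzIdx hand 0 ≠ [] := fun h => hz ((nzIdx_nil_iff hand 0).mp h)
    obtain ⟨f, rest, hfr⟩ := List.exists_cons_of_ne_nil hne
    have htwlt : (hand.takeWhile (fun x => x == 0)).length < hand.length := takeWhile_zero_lt hand hz
    have hrtwlt : (hand.reverse.takeWhile (fun x => x == 0)).length < hand.length := by
      have := takeWhile_zero_lt hand.reverse (by
        intro hall; exact hz (fun x hx => hall x (List.mem_reverse.mpr hx)))
      simpa using this
    set tw := (hand.takeWhile (fun x => x == 0)).length with htw_def
    set rtw := (hand.reverse.takeWhile (fun x => x == 0)).length with hrtw_def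
    set l : Nat := hand.length - 1 - rtw with hl_def
    have hf : f = (tw : Int) := by
      have := nzIdx_head hand 0 hne
      rw [hfr] at this
      simpa using this
    have hlast : (f :: rest).getLast (List.cons_ne_nil f rest) = (l : Int) := by
      have h3 := nzIdx_last hand 0 hne
      rw [hfr, List.getLast?_eq_getLast_of_ne_nil (List.cons_ne_nil f rest)] at h3
      have := Option.some_injective _ h3
      rw [this]
      omega
    have hllt : l < hand.length := by omega
    rw [show (hand.length : Int) - 1 - (rtw : Int) = (l : Int) by omega]
    simp only [handGravityPosition_alt, hfr]
    rw [hlast, hf]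
    rw [aLoop_spec hand tw l hllt]
    have hslice : PySem.List.slice hand (some (tw : Int)) (some ((l : Int) + 1)) =
        (hand.take (l + 1)).drop tw := by
      rw [PySem.List.slice_toNat hand (by positivity) (by positivity)]
      rw [List.drop_take]
      norm_num
    rw [hslice]
    rw [pyListLt_cmp3 _ _ (by simp)]
    rfl
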